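-- pv_equiv track=rewrite | github.com/PlatDrake2875/Flintstones-Family-Image-Recognition-App | src/Utilities.py | get_image_coords_dict
-- ===== SOURCE A (Python) =====
-- def get_image_coords_dict(char_metadata):
--     """
--     Generates a dictionary of coordatinates for every image of a protagonist.
--     Every image gets a list of coordinates for the characters it contains.
--     :param char_metadata: List of tuples (image_cnt, coords, character_label)
--     :return:
--     """
--     image_coords_dict = {}
--     for image_cnt, coords, _ in char_metadata:
--         if image_cnt not in image_coords_dict:
--             image_coords_dict[image_cnt] = [coords]
--         else:
--             image_coords_dict[image_cnt].append(coords)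
--
--     return image_coords_dict
-- ===== SOURCE B (Python) =====
-- def get_image_coords_dict(char_metadata):
--     keys = []
--     for image_cnt, _, _ in char_metadata:
--         if image_cnt not in keys:
--             keys.append(image_cnt)
--     return {k: [coords for image_cnt, coords, _ in char_metadata if image_cnt == k]
--             for k in keys}
-- ===== Notes on version B (the rewrite author's own statement) =====
-- stated objective: alternative
-- what changed: Replaces A's incremental dict building (insert-or-append per element) with a two-phase strategy: collect the distinct keys in first-appearance order, then build each group in one comprehension pass filtering the whole list per key.
import Mathlib
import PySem

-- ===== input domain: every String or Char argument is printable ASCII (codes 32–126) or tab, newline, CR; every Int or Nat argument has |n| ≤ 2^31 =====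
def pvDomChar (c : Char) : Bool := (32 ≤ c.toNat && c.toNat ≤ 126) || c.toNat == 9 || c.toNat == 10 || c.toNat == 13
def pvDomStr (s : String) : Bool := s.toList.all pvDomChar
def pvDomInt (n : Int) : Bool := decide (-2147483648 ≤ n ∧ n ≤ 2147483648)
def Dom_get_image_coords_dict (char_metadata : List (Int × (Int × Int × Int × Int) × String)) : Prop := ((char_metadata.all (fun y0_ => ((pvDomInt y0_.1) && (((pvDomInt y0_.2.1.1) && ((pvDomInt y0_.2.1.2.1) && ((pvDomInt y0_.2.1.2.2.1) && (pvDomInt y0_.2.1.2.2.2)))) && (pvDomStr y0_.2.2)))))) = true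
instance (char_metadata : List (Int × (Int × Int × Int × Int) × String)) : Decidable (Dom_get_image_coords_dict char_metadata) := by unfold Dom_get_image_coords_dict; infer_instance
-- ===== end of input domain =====

-- B groups by a two-phase strategy (distinct keys in first-appearance order, then one filtering pass per key) instead of A's incremental insert-or-append dict building; alternative decomposition, same return value.

-- ===== PORT A =====
def get_image_coords_dict (char_metadata : List (Int × (Int × Int × Int × Int) × String)) : List (Int × List (Int × Int × Int × Int)) :=
  -- image_coords_dict = {}; for image_cnt, coords, _ in char_metadata: if image_cnt not in d: d[k]=[coords] else d[k].append(coords)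
  (char_metadata.foldl
    (fun d t =>
      match t with
      | (image_cnt, coords, _) =>
        if !(d.contains image_cnt) then d.insert image_cnt [coords]
        else d.modify image_cnt [] (fun v => v ++ [coords]))
    PySem.Dict.empty).items

-- ===== PORT B =====
def get_image_coords_dict_alt (char_metadata : List (Int × (Int × Int × Int × Int) × String)) : List (Int × List (Int × Int × Int × Int)) :=
  -- keys = []; for image_cnt, _, _ in char_metadata: if image_cnt not in keys: keys.append(image_cnt)
  let keys : List Int := char_metadata.foldl (fun ks t => if ks.contains t.1 then ks else ks ++ [t.1]) []
  -- {k: [coords for image_cnt, coords, _ in char_metadata if image_cnt == k] for k in keys}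
  keys.map (fun k => (k, char_metadata.filterMap (fun t => if t.1 = k then some t.2.1 else none)))

-- ===== PRECONDITION & SPEC =====
def Spec_get_image_coords_dict (char_metadata : List (Int × (Int × Int × Int × Int) × String)) (out : List (Int × List (Int × Int × Int × Int))) : Prop := out = get_image_coords_dict_alt char_metadata
instance (char_metadata : List (Int × (Int × Int × Int × Int) × String)) (out : List (Int × List (Int × Int × Int × Int))) : Decidable (Spec_get_image_coords_dict char_metadata out) := by unfold Spec_get_image_coords_dict; infer_instance

-- ===== CLAIM (what is proved, stated in full; the proofs are below) =====
def Claim_equal_get_image_coords_dict : Prop := ∀ (char_metadata : List (Int × (Int × Int × Int × Int) × String)), Dom_get_image_coords_dict char_metadata → Spec_get_image_coords_dict char_metadata (get_image_coords_dict char_metadata)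

-- ===== LEMMAS AND PROOFS =====

-- the per-element step of A's loop
def pvStepA (d : PySem.Dict Int (List (Int × Int × Int × Int))) (t : Int × (Int × Int × Int × Int) × String) : PySem.Dict Int (List (Int × Int × Int × Int)) :=
  match t with
  | (image_cnt, coords, _) =>
    if !(d.contains image_cnt) then d.insert image_cnt [coords]
    else d.modify image_cnt [] (fun v => v ++ [coords])

-- the group B computes for key k
def pvColl (l : List (Int × (Int × Int × Int × Int) × String)) (k : Int) : List (Int × Int × Int × Int) :=
  l.filterMap (fun t => if t.1 = k then some t.2.1 else none)

theorem pvColl_append (l l' : List (Int × (Int × Int × Int × Int) × String)) (k : Int) :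
    pvColl (l ++ l') k = pvColl l k ++ pvColl l' k := by
  simp [pvColl, List.filterMap_append]

theorem pvColl_nil_of_not_mem (l : List (Int × (Int × Int × Int × Int) × String)) (k : Int)
    (h : k ∉ l.map (·.1)) : pvColl l k = [] := by
  induction l with
  | nil => rfl
  | cons t rest ih =>
    simp only [List.map_cons, List.mem_cons, not_or] at h
    simp only [pvColl, List.filterMap_cons, if_neg (Ne.symm h.1)]
    exact ih h.2

-- invariant of A's loop: the dict's items are exactly B's map over the distinct keys
theorem pvMain (l : List (Int × (Int × Int × Int × Int) × String)) :
    (l.foldl pvStepA PySem.Dict.empty).items =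
      (PySem.Set.ofList (l.map (·.1))).map (fun k => (k, pvColl l k)) := by
  induction l using List.reverseRecOn with
  | nil => rfl
  | append_singleton l t ih =>
    obtain ⟨ic, c, s⟩ := t
    set d := l.foldl pvStepA PySem.Dict.empty with hd
    set K := PySem.Set.ofList (l.map (·.1)) with hK
    have hkeys : d.keys = K := by
      simp only [PySem.Dict.keys, ih, List.map_map]
      exact (List.map_congr_left fun k _ => rfl).trans (List.map_id K)
    have hnd : K.Nodup := PySem.Set.nodup_ofList _
    have hcont : d.contains ic = decide (ic ∈ K) := by
      rw [PySem.Dict.contains_eq_decide_mem_keys, hkeys]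
    have hofl : PySem.Set.ofList ((l ++ [(ic, c, s)]).map (·.1)) = PySem.Set.add K ic := by
      simp only [List.map_append, List.map_cons, List.map_nil, PySem.Set.ofList_append,
        PySem.Set.update_cons, PySem.Set.update_nil]
      rw [hK]
    have hsing : ∀ k : Int, k ≠ ic → pvColl [(ic, c, s)] k = [] := by
      intro k hk
      simp [pvColl, Ne.symm hk]
    have hsing2 : pvColl [(ic, c, s)] ic = [c] := by simp [pvColl]
    rw [List.foldl_append, List.foldl_cons, List.foldl_nil, hofl]
    by_cases ht : ic ∈ K
    · -- key already present: A appends to the existing group, B's group gains one element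
      have hc : d.contains ic = true := by rw [hcont]; exact decide_eq_true ht
      have hadd : PySem.Set.add K ic = K := by
        simp only [PySem.Set.add]
        rw [if_pos (by simp [PySem.Set.contains, ht])]
      have hmem : (ic, pvColl l ic) ∈ d.items := by
        rw [ih]; exact List.mem_map.2 ⟨ic, ht, rfl⟩
      have hgetD : d.getD ic [] = pvColl l ic :=
        PySem.Dict.getD_of_mem_items _ hmem (by rw [hkeys]; exact hnd) []
      show (pvStepA d (ic, c, s)).items = _
      rw [pvStepA, if_neg (by simp [hc]), PySem.Dict.modify, hgetD,
        PySem.Dict.items_insert_of_contains _ _ hc, ih, hadd, List.map_map]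
      refine List.map_congr_left (fun k hk => ?_)
      simp only [Function.comp_apply]
      rw [pvColl_append]
      by_cases hki : k = ic
      · subst hki
        simp [hsing2]
      · have hb : (k == ic) = false := by simpa using hki
        simp [hb, hsing k hki]
    · -- fresh key: A appends a new entry at the end, B appends the key
      have hc : d.contains ic = false := by rw [hcont]; exact decide_eq_false ht
      have hadd : PySem.Set.add K ic = K ++ [ic] := by
        simp only [PySem.Set.add]
        rw [if_neg (by simp [PySem.Set.contains, ht])]
      have hnil : pvColl l ic = [] := by
        apply pvColl_nil_of_not_mem
        intro hmem
        exact ht ((PySem.Set.mem_ofList _ _).2 hmem)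
      show (pvStepA d (ic, c, s)).items = _
      rw [pvStepA, if_pos (by simp [hc]),
        PySem.Dict.items_insert_of_not_contains _ _ hc, ih, hadd, List.map_append]
      congr 1
      · refine List.map_congr_left (fun k hk => ?_)
        have hki : k ≠ ic := fun h => ht (h ▸ hk)
        rw [pvColl_append, hsing k hki, List.append_nil]
      · rw [List.map_cons, List.map_nil, pvColl_append, hnil, hsing2, List.nil_append]

theorem get_image_coords_dict_spec : Claim_equal_get_image_coords_dict := by
  intro l _
  unfold Spec_get_image_coords_dict get_image_coords_dict get_image_coords_dict_alt
  have hk : l.foldl (fun ks t => if ks.contains t.1 then ks else ks ++ [t.1]) ([] : List Int)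
      = PySem.Set.ofList (l.map (·.1)) := by
    rw [show (fun (ks : List Int) (t : Int × (Int × Int × Int × Int) × String) => if ks.contains t.1 then ks else ks ++ [t.1]) = (fun s t => PySem.Set.add s t.1) from rfl,
      ← PySem.Set.update_map_eq_foldl_add, PySem.Set.update_nil_left]
  rw [show (fun (d : PySem.Dict Int (List (Int × Int × Int × Int))) t =>
      match t with
      | (image_cnt, coords, _) =>
        if !(d.contains image_cnt) then d.insert image_cnt [coords]
        else d.modify image_cnt [] (fun v => v ++ [coords])) = pvStepA from rfl]
  rw [pvMain l, hk]
  rfl
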